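-- pv_equiv track=rewrite | github.com/youtarie560/BPE-tokenization | bpe.py | learn_bpe_devoir
-- ===== SOURCE A (Python) =====
-- from collections import defaultdict
-- from typing import List
--
-- def learn_bpe_devoir(word: str, num_merges: int =3) -> List[int]:
--     """
--     learn_bpe function is designed to learn and return
--     the most frequent character pairs from the input text.
--     It also merges these frequent pairs iteratively.
--
--     We iterate through the vocabulaireulary to find the most frequent adjacent character pair
--     and perform the merge.
--     Process repeats for a defined number of merges (num_merges).
--     """
--     # au debut, vocabulaire est peuple avec des bytes
--     vocabulaire = defaultdict(int)
--
--
--     for c in word: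
--         chars = ['<'] + list(c) + ['>']
--         for i in range(len(chars) - 1):
--             pair = (chars[i], chars[i + 1])
--             vocabulaire[pair] += 1
--     # vocabulaire va etre peuple avec les subwords
--
--     merges = []
--     for _ in range(num_merges):
--         if not vocabulaire:
--             break
--
--         most_frequent = max(vocabulaire, key=lambda x: vocabulaire[x])
--         merges.append(most_frequent)
--
--         new_char = ''.join(most_frequent)
--         new_vocabulaire = defaultdict(int)
--         for pair in vocabulaire:
--             count = vocabulaire[pair]
--             if pair == most_frequent:
--                 continue
--             new_pair = list(pair)
--             if new_pair[0] == most_frequent[0] and new_pair[1] == most_frequent[1]: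
--                 new_pair[0] = new_char
--                 new_pair.pop(1)
--             new_vocabulaire[tuple(new_pair)] += count
--         vocabulaire = new_vocabulaire
--     return merges
-- ===== SOURCE B (Python) =====
-- def learn_bpe_devoir(word: str, num_merges: int = 3):
--     """Count the ('<',c) and (c,'>') pairs of each character once, then rank all
--     pairs in a single stable sort by descending count (ties keep first-seen order)
--     and return the top num_merges, instead of A's repeated max-scan-and-rebuild."""
--     vocabulaire = {}
--     for c in word:
--         chars = ['<'] + list(c) + ['>']
--         for i in range(len(chars) - 1):
--             pair = (chars[i], chars[i + 1])
--             vocabulaire[pair] = vocabulaire.get(pair, 0) + 1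
--     ranked = sorted(vocabulaire, key=lambda p: -vocabulaire[p])
--     return ranked[:max(0, num_merges)]
-- ===== Notes on version B (the rewrite author's own statement) =====
-- stated objective: alternative
-- what changed: The pair-counting loop is kept, but A's num_merges rounds of scanning the whole dict for the max and rebuilding the dict without it are replaced by one stable sort of the pairs by descending count (ties keep insertion order, reproducing A's first-max tie-break) followed by taking the first num_merges.
import Mathlib
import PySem

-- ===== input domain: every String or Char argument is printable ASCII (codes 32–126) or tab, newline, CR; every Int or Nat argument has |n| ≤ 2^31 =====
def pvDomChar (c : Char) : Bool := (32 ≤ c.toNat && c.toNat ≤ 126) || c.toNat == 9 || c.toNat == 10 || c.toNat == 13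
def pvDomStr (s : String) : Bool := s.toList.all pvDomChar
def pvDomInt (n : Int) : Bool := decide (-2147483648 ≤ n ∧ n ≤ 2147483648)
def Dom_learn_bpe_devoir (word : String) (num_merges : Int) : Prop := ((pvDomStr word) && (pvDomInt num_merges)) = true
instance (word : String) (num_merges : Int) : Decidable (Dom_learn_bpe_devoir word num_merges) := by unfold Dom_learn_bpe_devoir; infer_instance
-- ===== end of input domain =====

-- B replaces A's repeated max-scan-and-rebuild selection by ONE stable sort of the
-- pair counts (ties keep insertion order) followed by a take; the counting loop stays.

-- ===== PORT A =====
-- counting loop: for c in word: chars = ['<'] + list(c) + ['>']; pairs via range(len(chars)-1); defaultdict +=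
def pvCountA (word : String) : PySem.Dict (String × String) Int :=
  word.toList.foldl (fun voc c =>
    let chars : List String := ["<"] ++ [String.mk [c]] ++ [">"]
    (PySem.List.pyRange 0 (PySem.List.len chars - 1) 1).foldl (fun voc i =>
      let pair := (PySem.List.pyGetD chars i "", PySem.List.pyGetD chars (i + 1) "")
      voc.modify pair 0 (· + 1)) voc) PySem.Dict.empty

-- the rebuild of vocabulaire after a merge; the Python branch
-- 'if new_pair[0] == most_frequent[0] and new_pair[1] == most_frequent[1]' is exactly
-- 'pair == most_frequent', already skipped by the preceding 'continue', so new_pair = pair here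
def pvRebuildA (voc : PySem.Dict (String × String) Int) (mf : String × String) :
    PySem.Dict (String × String) Int :=
  voc.items.foldl (fun nv pc =>
    if pc.1 == mf then nv
    else nv.modify pc.1 0 (· + pc.2)) PySem.Dict.empty

def pvMergeLoopA : Nat → PySem.Dict (String × String) Int → List (String × String) → List (String × String)
  | 0, _, merges => merges
  | n + 1, voc, merges =>
    if voc.items.isEmpty then merges
    else
      match PySem.List.max? voc.keys (fun x => voc.getD x 0) with
      | none => merges  -- unreachable: voc is nonempty here
      | some mf => pvMergeLoopA n (pvRebuildA voc mf) (merges ++ [mf])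

def learn_bpe_devoir (word : String) (num_merges : Int) : List (String × String) :=
  pvMergeLoopA num_merges.toNat (pvCountA word) []

-- ===== PORT B =====
-- same counting loop, written with plain dict + .get
def pvCountB (word : String) : PySem.Dict (String × String) Int :=
  word.toList.foldl (fun voc c =>
    let chars : List String := ["<"] ++ [String.mk [c]] ++ [">"]
    (PySem.List.pyRange 0 (PySem.List.len chars - 1) 1).foldl (fun voc i =>
      let pair := (PySem.List.pyGetD chars i "", PySem.List.pyGetD chars (i + 1) "")
      voc.insert pair (voc.getD pair 0 + 1)) voc) PySem.Dict.empty

def learn_bpe_devoir_alt (word : String) (num_merges : Int) : List (String × String) :=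
  let voc := pvCountB word
  let ranked := PySem.List.sorted voc.keys (fun p => -(voc.getD p 0))
  PySem.List.slice ranked none (some (max 0 num_merges))

-- ===== PRECONDITION & SPEC =====
def Spec_learn_bpe_devoir (word : String) (num_merges : Int) (out : List (String × String)) : Prop := out = learn_bpe_devoir_alt word num_merges
instance (word : String) (num_merges : Int) (out : List (String × String)) : Decidable (Spec_learn_bpe_devoir word num_merges out) := by unfold Spec_learn_bpe_devoir; infer_instance

-- ===== CLAIM (what is proved, stated in full; the proofs are below) =====
def Claim_equal_learn_bpe_devoir : Prop := ∀ (word : String) (num_merges : Int), Dom_learn_bpe_devoir word num_merges → Spec_learn_bpe_devoir word num_merges (learn_bpe_devoir word num_merges)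

-- ===== LEMMAS AND PROOFS =====

-- the two counting loops build the same dict (modify k 0 (·+c) and insert k (getD k 0 + c) are definitionally equal)
lemma pvCount_eq (word : String) : pvCountA word = pvCountB word := rfl

-- keys of the counting dict are nodup
lemma pvCount_nodup (word : String) : (pvCountB word).keys.Nodup := by
  unfold pvCountB
  generalize word.toList = cs
  induction cs using List.reverseRecOn with
  | nil => exact PySem.Dict.nodup_keys_empty
  | append_singleton cs c ih =>
    rw [List.foldl_append, List.foldl_cons, List.foldl_nil]
    exact PySem.Dict.nodup_keys_foldl_insert_key _
      (fun i => (PySem.List.pyGetD (["<"] ++ [String.mk [c]] ++ [">"]) i "",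
                 PySem.List.pyGetD (["<"] ++ [String.mk [c]] ++ [">"]) (i + 1) ""))
      (fun voc i => voc.getD (PySem.List.pyGetD (["<"] ++ [String.mk [c]] ++ [">"]) i "",
                 PySem.List.pyGetD (["<"] ++ [String.mk [c]] ++ [">"]) (i + 1) "") 0 + 1) _ ih

-- max? returns the FIRST maximal element: decomposition
lemma pv_max?_decomp {α : Type} (key : α → Int) :
    ∀ (l : List α) (m : α), PySem.List.max? l key = some m →
      ∃ l1 l2, l = l1 ++ m :: l2 ∧ (∀ y ∈ l1, key y < key m) ∧ (∀ z ∈ l2, ¬ key m < key z) := by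
  intro l
  induction l using List.reverseRecOn with
  | nil => intro m h; simp [PySem.List.max?] at h
  | append_singleton l x ih =>
    intro m h
    have hstep : PySem.List.max? (l ++ [x]) key
        = (match PySem.List.max? l key with
           | none => some x
           | some m' => if key m' < key x then some x else some m') := by
      simp only [PySem.List.max?, List.foldl_append, List.foldl_cons, List.foldl_nil]
      rfl
    rw [hstep] at h
    cases hml : PySem.List.max? l key with
    | none =>
      rw [hml] at h
      dsimp only at h
      obtain rfl : x = m := by injection h
      have hl : l = [] := (PySem.List.max?_eq_none_iff l key).mp hml
      exact ⟨[], [], by simp [hl], by simp, by simp⟩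
    | some m' =>
      rw [hml] at h
      dsimp only at h
      by_cases hlt : key m' < key x
      · rw [if_pos hlt] at h
        obtain rfl : x = m := by injection h
        refine ⟨l, [], by simp, ?_, by simp⟩
        intro y hy
        exact lt_of_le_of_lt (PySem.List.max?_isMax hml y hy) hlt
      · rw [if_neg hlt] at h
        obtain ⟨l1, l2, hdec, h1, h2⟩ := ih m' hml
        obtain rfl : m' = m := by injection h
        refine ⟨l1, l2 ++ [x], by simp [hdec], h1, ?_⟩
        intro z hz
        rcases List.mem_append.mp hz with hz | hz
        · exact h2 z hz
        · simp only [List.mem_singleton] at hz; subst hz; exact hlt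

-- insertBy puts x in front when it is strictly before everything
lemma pv_insertBy_front {α : Type} (bef : α → α → Bool) (m : α) (s : List α)
    (h : ∀ y ∈ s, bef m y = true) : PySem.List.insertBy bef m s = m :: s := by
  cases s with
  | nil => rfl
  | cons y ys => simp [PySem.List.insertBy, h y (by simp)]

-- folding further elements that do not go before m keeps m in front
lemma pv_foldl_ins_keep {α : Type} (bef : α → α → Bool) (m : α) :
    ∀ (l2 : List α) (s : List α), (∀ z ∈ l2, bef z m = false) →
      l2.foldl (fun acc x => PySem.List.insertBy bef x acc) (m :: s)
        = m :: l2.foldl (fun acc x => PySem.List.insertBy bef x acc) s := by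
  intro l2
  induction l2 with
  | nil => intro s _; rfl
  | cons z l2 ih =>
    intro s h
    simp only [List.foldl_cons]
    rw [show PySem.List.insertBy bef z (m :: s) = m :: PySem.List.insertBy bef z s from by
      simp [PySem.List.insertBy, h z (by simp)]]
    exact ih _ (fun w hw => h w (by simp [hw]))

-- the stable sort of l1 ++ m :: l2 with m a first-minimum is m :: sort of the rest
lemma pv_sorted_head {α : Type} (key : α → Int) (m : α) (l1 l2 : List α)
    (h1 : ∀ y ∈ l1, key m < key y) (h2 : ∀ z ∈ l2, ¬ key z < key m) :
    PySem.List.sorted (l1 ++ m :: l2) key false = m :: PySem.List.sorted (l1 ++ l2) key false := by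
  have hsdef : ∀ (xs : List α), PySem.List.sorted xs key false
      = xs.foldl (fun acc x => PySem.List.insertBy (fun a b => decide (key a < key b)) x acc) [] := by
    intro xs; simp [PySem.List.sorted]
  rw [hsdef, hsdef, List.foldl_append, List.foldl_append, List.foldl_cons]
  rw [pv_insertBy_front _ m _ (fun y hy => by
    have hy' : y ∈ l1 := (PySem.List.sorted_perm l1 key false).mem_iff.mp
      (show y ∈ PySem.List.sorted l1 key false by rw [hsdef]; exact hy)
    simp [h1 y hy'])]
  exact pv_foldl_ins_keep _ m l2 _ (fun z hz => by simp [h2 z hz])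

lemma pv_insertBy_congr {α : Type} (b1 b2 : α → α → Bool) (x : α) :
    ∀ (s : List α), (∀ y ∈ s, b1 x y = b2 x y) →
      PySem.List.insertBy b1 x s = PySem.List.insertBy b2 x s := by
  intro s
  induction s with
  | nil => intro _; rfl
  | cons y ys ih =>
    intro h
    simp only [PySem.List.insertBy]
    rw [h y (by simp), ih (fun w hw => h w (by simp [hw]))]

-- sorting depends on the key only through its values on the list
lemma pv_sorted_congr {α : Type} (k1 k2 : α → Int) (xs : List α)
    (h : ∀ a ∈ xs, k1 a = k2 a) :
    PySem.List.sorted xs k1 false = PySem.List.sorted xs k2 false := by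
  have main : ∀ (l : List α) (acc : List α), (∀ a ∈ l, k1 a = k2 a) → (∀ y ∈ acc, k1 y = k2 y) →
      l.foldl (fun acc x => PySem.List.insertBy (fun a b => decide (k1 a < k1 b)) x acc) acc
        = l.foldl (fun acc x => PySem.List.insertBy (fun a b => decide (k2 a < k2 b)) x acc) acc := by
    intro l
    induction l with
    | nil => intro acc _ _; rfl
    | cons x l ih =>
      intro acc hl hacc
      simp only [List.foldl_cons]
      rw [pv_insertBy_congr _ _ x acc (fun y hy => by
        rw [hl x (by simp), hacc y hy])]
      exact ih _ (fun a ha => hl a (by simp [ha])) (fun y hy => by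
        rcases (PySem.List.mem_insertBy _ x y acc).mp hy with rfl | hy
        · exact hl y (by simp)
        · exact hacc y hy)
  simpa [PySem.List.sorted] using main xs [] h (by simp)

-- the rebuild loop appends the surviving items in order
lemma pv_rebuild_items_aux (mf : String × String) :
    ∀ (ps : List ((String × String) × Int)) (nd : PySem.Dict (String × String) Int),
      (ps.map (·.1)).Nodup → (∀ p ∈ ps, nd.contains p.1 = false) →
      (ps.foldl (fun nv pc => if pc.1 == mf then nv else nv.modify pc.1 0 (· + pc.2)) nd).items
        = nd.items ++ (ps.filter (fun p => !(p.1 == mf))).map (fun p => (p.1, (0 : Int) + p.2)) := by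
  intro ps
  induction ps with
  | nil => intro nd _ _; simp
  | cons p ps ih =>
    intro nd hnd hcont
    have hnd' : (ps.map (·.1)).Nodup := (List.nodup_cons.mp (by simpa using hnd)).2
    have hpnotin : p.1 ∉ ps.map (·.1) := (List.nodup_cons.mp (by simpa using hnd)).1
    simp only [List.foldl_cons, List.filter_cons]
    cases hpm : (p.1 == mf) with
    | true =>
      rw [if_pos rfl, ih nd hnd' (fun q hq => hcont q (by simp [hq]))]
      simp
    | false =>
      rw [if_neg (by simp)]
      have hstep : nd.modify p.1 0 (· + p.2) = nd.insert p.1 ((0 : Int) + p.2) := by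
        show nd.insert p.1 (nd.getD p.1 0 + p.2) = nd.insert p.1 ((0 : Int) + p.2)
        rw [PySem.Dict.getD_of_not_contains nd 0 (hcont p (by simp))]
      rw [hstep]
      have hfresh : ∀ q ∈ ps, (nd.insert p.1 ((0 : Int) + p.2)).contains q.1 = false := by
        intro q hq
        rw [PySem.Dict.contains_insert]
        have hne : q.1 ≠ p.1 := fun hqe => hpnotin (List.mem_map.mpr ⟨q, hq, hqe⟩)
        simp [hne, hcont q (by simp [hq])]
      rw [ih _ hnd' hfresh, PySem.Dict.items_insert_of_not_contains nd _ (hcont p (by simp))]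
      simp

lemma pv_rebuild_items (voc : PySem.Dict (String × String) Int) (mf : String × String)
    (h : voc.keys.Nodup) :
    (pvRebuildA voc mf).items
      = (voc.items.filter (fun p => !(p.1 == mf))).map (fun p => (p.1, (0 : Int) + p.2)) := by
  unfold pvRebuildA
  rw [pv_rebuild_items_aux mf voc.items PySem.Dict.empty (by simpa [PySem.Dict.keys] using h)
    (fun p _ => PySem.Dict.contains_empty p.1)]
  rfl

lemma pv_map_fst_filter (mf : String × String) :
    ∀ (l : List ((String × String) × Int)),
      (((l.filter (fun p => !(p.1 == mf))).map (fun p => (p.1, (0 : Int) + p.2))).map (·.1))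
        = (l.map (·.1)).filter (fun k => !(k == mf)) := by
  intro l
  induction l with
  | nil => rfl
  | cons p l ih =>
    simp only [List.filter_cons, List.map_cons]
    cases hpm : (p.1 == mf) with
    | true => simpa [hpm] using ih
    | false => simpa [hpm] using ih

lemma pv_rebuild_keys (voc : PySem.Dict (String × String) Int) (mf : String × String)
    (h : voc.keys.Nodup) :
    (pvRebuildA voc mf).keys = voc.keys.filter (fun k => !(k == mf)) := by
  show ((pvRebuildA voc mf).items.map (·.1)) = (voc.items.map (·.1)).filter (fun k => !(k == mf))
  rw [pv_rebuild_items voc mf h, pv_map_fst_filter]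

lemma pv_rebuild_getD (voc : PySem.Dict (String × String) Int) (mf k : String × String)
    (h : voc.keys.Nodup) (hk : k ∈ voc.keys) (hne : k ≠ mf) :
    (pvRebuildA voc mf).getD k 0 = voc.getD k 0 := by
  have hk' : k ∈ voc.items.map (·.1) := hk
  obtain ⟨p, hp, hpk⟩ := List.mem_map.mp hk'
  have hpmem : (k, p.2) ∈ voc.items := by
    cases p with
    | mk a b => simpa [← hpk] using hp
  have hv : voc.getD k 0 = p.2 := PySem.Dict.getD_of_mem_items voc hpmem h 0
  have hmemR : (k, (0 : Int) + p.2) ∈ (pvRebuildA voc mf).items := by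
    rw [pv_rebuild_items voc mf h]
    refine List.mem_map.mpr ⟨p, List.mem_filter.mpr ⟨hp, ?_⟩, by rw [hpk]⟩
    simp [hpk, hne]
  have hRnd : (pvRebuildA voc mf).keys.Nodup := by
    rw [pv_rebuild_keys voc mf h]; exact h.filter _
  rw [PySem.Dict.getD_of_mem_items _ hmemR hRnd 0, hv]
  ring

-- main loop invariant: the selection loop produces the stable sort, truncated
lemma pv_mergeLoop_eq :
    ∀ (n : Nat) (voc : PySem.Dict (String × String) Int) (acc : List (String × String)),
      voc.keys.Nodup →
      pvMergeLoopA n voc acc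
        = acc ++ (PySem.List.sorted voc.keys (fun p => -(voc.getD p 0)) false).take n := by
  intro n
  induction n with
  | zero => intro voc acc _; simp [pvMergeLoopA]
  | succ n ih =>
    intro voc acc h
    by_cases he : voc.items.isEmpty
    · have hk : voc.keys = [] := by
        simp [PySem.Dict.keys, List.isEmpty_iff.mp he]
      simp [pvMergeLoopA, he, hk, PySem.List.sorted]
    · have hkne : voc.keys ≠ [] := by
        simp only [PySem.Dict.keys, ne_eq, List.map_eq_nil_iff]
        intro hc; exact he (by simp [hc])
      obtain ⟨mf, hmf⟩ : ∃ mf, PySem.List.max? voc.keys (fun x => voc.getD x 0) = some mf := by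
        cases hm : PySem.List.max? voc.keys (fun x => voc.getD x 0) with
        | none => exact absurd ((PySem.List.max?_eq_none_iff _ _).mp hm) hkne
        | some mf => exact ⟨mf, rfl⟩
      obtain ⟨l1, l2, hdec, h1, h2⟩ := pv_max?_decomp _ voc.keys mf hmf
      have hnd' := h
      rw [hdec] at hnd'
      have hnotin : mf ∉ l1 ++ l2 := (List.nodup_cons.mp (List.nodup_middle.mp hnd')).1
      have hmf1 : mf ∉ l1 := fun hc => hnotin (List.mem_append_left _ hc)
      have hmf2 : mf ∉ l2 := fun hc => hnotin (List.mem_append_right _ hc)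
      rw [show pvMergeLoopA (n + 1) voc acc = pvMergeLoopA n (pvRebuildA voc mf) (acc ++ [mf]) from by
        simp [pvMergeLoopA, he, hmf]]
      have hRkeys : (pvRebuildA voc mf).keys = l1 ++ l2 := by
        rw [pv_rebuild_keys voc mf h, hdec, List.filter_append]
        congr 1
        · exact List.filter_eq_self.mpr (fun y hy => by
            simp [show y ≠ mf from fun hc => hmf1 (hc ▸ hy)])
        · rw [List.filter_cons]
          simp only [beq_self_eq_true, Bool.not_true]
          rw [if_neg (by simp)]
          exact List.filter_eq_self.mpr (fun z hz => by
            simp [show z ≠ mf from fun hc => hmf2 (hc ▸ hz)])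
      have hRnd : (pvRebuildA voc mf).keys.Nodup := by
        rw [pv_rebuild_keys voc mf h]; exact h.filter _
      rw [ih _ _ hRnd]
      have hsorted : PySem.List.sorted voc.keys (fun p => -(voc.getD p 0)) false
          = mf :: PySem.List.sorted (l1 ++ l2) (fun p => -(voc.getD p 0)) false := by
        rw [hdec]
        exact pv_sorted_head _ mf l1 l2
          (fun y hy => by have := h1 y hy; omega)
          (fun z hz => by have := h2 z hz; omega)
      have hcongr : PySem.List.sorted ((pvRebuildA voc mf).keys)
            (fun p => -((pvRebuildA voc mf).getD p 0)) false
          = PySem.List.sorted (l1 ++ l2) (fun p => -(voc.getD p 0)) false := by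
        rw [hRkeys]
        apply pv_sorted_congr
        intro a ha
        have hamem : a ∈ voc.keys := by
          rw [hdec]
          rcases List.mem_append.mp ha with ha | ha
          · exact List.mem_append.mpr (Or.inl ha)
          · exact List.mem_append.mpr (Or.inr (by simp [ha]))
        have hane : a ≠ mf := by
          intro hc
          rcases List.mem_append.mp ha with ha | ha
          · exact hmf1 (hc ▸ ha)
          · exact hmf2 (hc ▸ ha)
        rw [pv_rebuild_getD voc mf a h hamem hane]
      rw [hcongr, hsorted]
      simp [List.take_succ_cons]

-- ===== VERDICT (by name: the statement is the Claim_ definition above) =====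
theorem learn_bpe_devoir_spec : Claim_equal_learn_bpe_devoir := by
  intro word num_merges _
  unfold Spec_learn_bpe_devoir learn_bpe_devoir learn_bpe_devoir_alt
  rw [pvCount_eq, pv_mergeLoop_eq _ _ _ (pvCount_nodup word)]
  rw [PySem.List.slice_to _ (le_max_left 0 num_merges)]
  simp only [List.nil_append]
  congr 1
  omega
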